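-- pv_equiv track=rewrite | github.com/BhekumusaEric/assessment | solution.py | draw_triangle_prime
-- ===== SOURCE A (Python) =====
-- def draw_triangle_prime(height: int) -> str:
--     """
--     Draw a triangle composed of prime numbers.
--     Example for height=2:
--     2
--     3 5
--     """
--     # TODO: Implement the prime number generation and drawing logic
--     def is_prime(num):
--         fact = []
--         for i in range(1 , num + 1):
--             if num % i == 0:
--                 fact.append(i)
--         if len(fact) > 2:
--             return False
--         return True
--
--     primes_needed = height * (height + 1) // 2
--
--     primes = []
--     num = 2
--     while len(primes) < primes_needed:
--         if is_prime(num):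
--             primes.append(num)
--         num += 1
--     final = []
--     line = []
--     index = 0
--     for i in range(1 , height + 1):
--         line.append(primes[index : index + i])
--         index += i
--     return line
-- ===== SOURCE B (Python) =====
-- def draw_triangle_prime(height: int) -> str:
--     # sqrt-bounded trial division with early exit instead of counting all divisors;
--     # rows built by repeatedly splitting off a prefix instead of index arithmetic.
--     def is_prime(n):
--         d = 2
--         while d * d <= n:
--             if n % d == 0:
--                 return False
--             d += 1
--         return n >= 2
--
--     needed = height * (height + 1) // 2
--     primes = []
--     cand = 2
--     while len(primes) < needed:
--         if is_prime(cand):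
--             primes.append(cand)
--         cand += 1
--
--     rows = []
--     for size in range(1, height + 1):
--         rows.append(primes[:size])
--         primes = primes[size:]
--     return rows
-- ===== Notes on version B (the rewrite author's own statement) =====
-- stated objective: faster
-- what changed: primality is decided by sqrt-bounded trial division with early exit instead of collecting every divisor of n in a list, and rows are built by repeatedly splitting a prefix off the prime list instead of index-arithmetic slicing
import Mathlib
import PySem

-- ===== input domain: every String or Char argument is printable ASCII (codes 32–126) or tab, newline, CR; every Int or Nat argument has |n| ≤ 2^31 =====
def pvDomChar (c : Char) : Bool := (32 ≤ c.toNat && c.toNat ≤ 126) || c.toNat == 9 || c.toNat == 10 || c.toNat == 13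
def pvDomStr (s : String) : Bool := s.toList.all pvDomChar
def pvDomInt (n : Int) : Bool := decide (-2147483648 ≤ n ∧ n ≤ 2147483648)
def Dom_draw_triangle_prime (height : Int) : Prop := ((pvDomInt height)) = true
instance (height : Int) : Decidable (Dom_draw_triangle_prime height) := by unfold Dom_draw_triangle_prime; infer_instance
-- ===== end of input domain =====

-- B replaces A's full divisor-collecting primality test by sqrt-bounded trial division with
-- early exit and builds rows by splitting prefixes off the prime list (objective: faster).


-- ===== PORT A =====

-- is_prime of A: collect every divisor of num in a list, prime iff at most two divisors
def pvIsPrimeA (num : Int) : Bool :=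
  let fact := (PySem.List.pyRange 1 (num + 1) 1).foldl
    (fun acc i => if PySem.Int.mod num i == 0 then acc ++ [i] else acc) ([] : List Int)
  if fact.length > 2 then false else true

-- the while loop; fuel is only a totality guard: 2^needed + 4 iterations always suffice
-- (the k-th prime is below 2^k by Bertrand's postulate), so the fuel-out branch is never hit
def pvALoop (needed : Int) (fuel : Nat) (primes : List Int) (num : Int) : List Int :=
  match fuel with
  | 0 => primes
  | f + 1 =>
    if (primes.length : Int) < needed then
      if pvIsPrimeA num then pvALoop needed f (primes ++ [num]) (num + 1)
      else pvALoop needed f primes (num + 1)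
    else primes

def draw_triangle_prime (height : Int) : List (List Int) :=
  let needed := PySem.Int.floordiv (height * (height + 1)) 2
  let primes := pvALoop needed (2 ^ needed.toNat + 4) [] 2
  ((PySem.List.pyRange 1 (height + 1) 1).foldl
    (fun (st : List (List Int) × Int) i =>
      (st.1 ++ [PySem.List.slice primes (some st.2) (some (st.2 + i))], st.2 + i))
    ([], 0)).1

-- ===== PORT B =====

-- is_prime of B: trial division while d*d <= n, early exit on a divisor;
-- fuel n.toNat + 2 is a totality guard only (d stays ≤ n while d*d ≤ n), never exhausted
def pvBTrial : Nat → Int → Int → Bool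
  | 0, n, _ => decide (2 ≤ n)
  | f + 1, n, d =>
    if d * d ≤ n then
      if PySem.Int.mod n d == 0 then false
      else pvBTrial f n (d + 1)
    else decide (2 ≤ n)

def pvIsPrimeB (n : Int) : Bool := pvBTrial (n.toNat + 2) n 2

def pvBLoop (needed : Int) (fuel : Nat) (primes : List Int) (cand : Int) : List Int :=
  match fuel with
  | 0 => primes
  | f + 1 =>
    if (primes.length : Int) < needed then
      if pvIsPrimeB cand then pvBLoop needed f (primes ++ [cand]) (cand + 1)
      else pvBLoop needed f primes (cand + 1)
    else primes

def draw_triangle_prime_alt (height : Int) : List (List Int) :=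
  let needed := PySem.Int.floordiv (height * (height + 1)) 2
  let primes := pvBLoop needed (2 ^ needed.toNat + 4) [] 2
  ((PySem.List.pyRange 1 (height + 1) 1).foldl
    (fun (st : List (List Int) × List Int) size =>
      (st.1 ++ [PySem.List.slice st.2 none (some size)], PySem.List.slice st.2 (some size) none))
    ([], primes)).1

-- ===== PRECONDITION & SPEC =====
def Spec_draw_triangle_prime (height : Int) (out : List (List Int)) : Prop := out = draw_triangle_prime_alt height
instance (height : Int) (out : List (List Int)) : Decidable (Spec_draw_triangle_prime height out) := by unfold Spec_draw_triangle_prime; infer_instance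

-- ===== CLAIM (what is proved, stated in full; the proofs are below) =====
def Claim_equal_draw_triangle_prime : Prop := ∀ (height : Int), Dom_draw_triangle_prime height → Spec_draw_triangle_prime height (draw_triangle_prime height)

-- ===== LEMMAS AND PROOFS =====

theorem pvFactA_eq (num : Int) :
    (PySem.List.pyRange 1 (num + 1) 1).foldl
      (fun acc i => if PySem.Int.mod num i == 0 then acc ++ [i] else acc) ([] : List Int)
    = (PySem.List.pyRange 1 (num + 1) 1).filter (fun i => PySem.Int.mod num i == 0) := by
  exact PySem.List.foldl_append_if_eq_filter _ _ _

theorem pvIsPrimeA_prime (num : Int) (h2 : 2 ≤ num) (hp : Nat.Prime num.toNat) :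
    pvIsPrimeA num = true := by
  unfold pvIsPrimeA
  rw [pvFactA_eq]
  set L := (PySem.List.pyRange 1 (num + 1) 1).filter (fun i => PySem.Int.mod num i == 0) with hL
  have hnodup : L.Nodup := (PySem.List.nodup_pyRange_one 1 (num + 1)).filter _
  have hmem : ∀ x ∈ L, x = 1 ∨ x = num := by
    intro x hx
    have hr := List.of_mem_filter hx
    have hx' := List.mem_of_mem_filter hx
    rw [PySem.List.mem_pyRange_one] at hx'
    have hdvd : x ∣ num := by
      rw [← PySem.Int.mod_eq_zero_iff_dvd]
      exact beq_iff_eq.mp hr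
    have hxpos : 0 ≤ x := by omega
    have hdN : x.toNat ∣ num.toNat := by
      have : (x.toNat : Int) ∣ (num.toNat : Int) := by
        rwa [Int.toNat_of_nonneg hxpos, Int.toNat_of_nonneg (by omega : (0:Int) ≤ num)]
      exact_mod_cast this
    rcases hp.eq_one_or_self_of_dvd _ hdN with h1 | h1
    · left; omega
    · right; omega
  have hsub : L.toFinset ⊆ ({1, num} : Finset Int) := by
    intro x hx
    rcases hmem x (List.mem_toFinset.mp hx) with h | h <;> simp [h]
  have hcard : L.length ≤ 2 := by
    have := Finset.card_le_card hsub
    rw [List.toFinset_card_of_nodup hnodup] at this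
    calc L.length ≤ ({1, num} : Finset Int).card := this
      _ ≤ 2 := Finset.card_insert_le 1 {num} |>.trans (by simp)
  rw [if_neg (by omega : ¬ L.length > 2)]

theorem pvIsPrimeA_composite (num : Int) (h2 : 2 ≤ num) (h : ¬ Nat.Prime num.toNat) :
    pvIsPrimeA num = false := by
  unfold pvIsPrimeA
  rw [pvFactA_eq]
  set L := (PySem.List.pyRange 1 (num + 1) 1).filter (fun i => PySem.Int.mod num i == 0) with hL
  obtain ⟨d, hdvd, hd2, hdlt⟩ :=
    Nat.exists_dvd_of_not_prime2 (by omega : 2 ≤ num.toNat) h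
  have hmemL : ∀ x : Int, 1 ≤ x → x ≤ num → x ∣ num → x ∈ L := by
    intro x hx1 hx2 hxd
    rw [hL, List.mem_filter]
    refine ⟨?_, by simpa [beq_iff_eq] using (PySem.Int.mod_eq_zero_iff_dvd num x).mpr hxd⟩
    rw [PySem.List.mem_pyRange_one]; omega
  have hdint : (d : Int) ∣ num := by
    have : (d : Int) ∣ (num.toNat : Int) := Int.natCast_dvd_natCast.mpr hdvd
    rwa [Int.toNat_of_nonneg (by omega : (0:Int) ≤ num)] at this
  have hdlt' : (d : Int) < num := by omega
  have h1 : (1 : Int) ∈ L := hmemL 1 (by omega) (by omega) (one_dvd num)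
  have hd : (d : Int) ∈ L := hmemL d (by exact_mod_cast Nat.one_le_of_lt hd2) (by omega) hdint
  have hn : num ∈ L := hmemL num (by omega) le_rfl dvd_rfl
  have hsub : ({1, (d : Int), num} : Finset Int) ⊆ L.toFinset := by
    intro x hx
    simp only [Finset.mem_insert, Finset.mem_singleton] at hx
    rcases hx with rfl | rfl | rfl <;> exact List.mem_toFinset.mpr (by assumption)
  have hcard3 : ({1, (d : Int), num} : Finset Int).card = 3 := by
    rw [Finset.card_insert_of_notMem (by simp; omega),
        Finset.card_insert_of_notMem (by simp; omega), Finset.card_singleton]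
  have hlen : 3 ≤ L.length := by
    have := Finset.card_le_card hsub
    rw [hcard3] at this
    exact this.trans (List.toFinset_card_le L)
  simp [show 2 < L.length by omega]

theorem pvBTrial_true_iff (n : Int) : ∀ (f : Nat) (d : Int), 0 ≤ d → (n : Int) < d + (f : Int) →
    (pvBTrial f n d = true ↔ (2 ≤ n ∧ ∀ e : Int, d ≤ e → e * e ≤ n → ¬ e ∣ n)) := by
  intro f
  induction f with
  | zero =>
    intro d hd0 hnd
    simp only [pvBTrial, decide_eq_true_eq]
    constructor
    · intro h2
      refine ⟨h2, fun e hde hee => absurd hee ?_⟩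
      intro hee'
      have h3 : 3 ≤ e := by omega
      have hnd' : n < d := by omega
      nlinarith [mul_nonneg (by omega : (0:Int) ≤ e - 1) (by omega : (0:Int) ≤ e)]
    · exact fun h => h.1
  | succ f ih =>
    intro d hd0 hnd
    rw [pvBTrial]
    split
    · next hdd =>
      rcases hmod : (PySem.Int.mod n d == 0) with _ | _
      · rw [if_neg (by simp : ¬ (false = true))]
        rw [ih (d + 1) (by omega) (by push_cast at hnd ⊢; omega)]
        have hnd' : ¬ d ∣ n := by
          intro hdvd
          have := (PySem.Int.mod_eq_zero_iff_dvd n d).mpr hdvd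
          simp [this] at hmod
        constructor
        · rintro ⟨h2, hall⟩
          refine ⟨h2, fun e hde hee => ?_⟩
          rcases eq_or_lt_of_le hde with rfl | hlt
          · exact hnd'
          · exact hall e (by omega) hee
        · rintro ⟨h2, hall⟩
          exact ⟨h2, fun e hde hee => hall e (by omega) hee⟩
      · rw [if_pos (rfl : true = true)]
        simp only [Bool.false_eq_true, false_iff, not_and, not_forall]
        intro _
        exact ⟨d, le_rfl, hdd, by simpa using (PySem.Int.mod_eq_zero_iff_dvd n d).mp (beq_iff_eq.mp hmod)⟩
    · next hdd =>
      simp only [decide_eq_true_eq]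
      constructor
      · intro h2
        refine ⟨h2, fun e hde hee => absurd hee ?_⟩
        intro hee
        exact hdd (le_trans (by nlinarith) hee)
      · exact fun h => h.1

theorem pvIsPrimeB_iff (n : Int) : pvIsPrimeB n = true ↔ (2 ≤ n ∧ Nat.Prime n.toNat) := by
  rw [pvIsPrimeB, pvBTrial_true_iff n (n.toNat + 2) 2 (by norm_num) (by push_cast; omega)]
  constructor
  · rintro ⟨h2, hall⟩
    refine ⟨h2, ?_⟩
    rw [Nat.prime_def_le_sqrt]
    refine ⟨by omega, fun m hm hsq hdvd => ?_⟩
    rw [Nat.le_sqrt] at hsq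
    refine hall (m : Int) (by exact_mod_cast hm) ?_ ?_
    · have : ((m * m : Nat) : Int) ≤ ((n.toNat : Nat) : Int) := by exact_mod_cast hsq
      push_cast at this
      omega
    · have : ((m : Nat) : Int) ∣ ((n.toNat : Nat) : Int) := Int.natCast_dvd_natCast.mpr hdvd
      rwa [Int.toNat_of_nonneg (by omega : (0:Int) ≤ n)] at this
  · rintro ⟨h2, hp⟩
    refine ⟨h2, fun e hde hee hdvd => ?_⟩
    rw [Nat.prime_def_le_sqrt] at hp
    refine hp.2 e.toNat (by omega) ?_ ?_
    · rw [Nat.le_sqrt]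
      have he0 : 0 ≤ e := by omega
      zify [Int.toNat_of_nonneg he0]
      rwa [Int.toNat_of_nonneg (by omega : (0:Int) ≤ n)]
    · have : (e.toNat : Int) ∣ (n.toNat : Int) := by
        rwa [Int.toNat_of_nonneg (by omega : (0:Int) ≤ e),
             Int.toNat_of_nonneg (by omega : (0:Int) ≤ n)]
      exact_mod_cast this

theorem pvTests_agree (num : Int) (h2 : 2 ≤ num) : pvIsPrimeA num = pvIsPrimeB num := by
  by_cases hp : Nat.Prime num.toNat
  · rw [pvIsPrimeA_prime num h2 hp, (pvIsPrimeB_iff num).mpr ⟨h2, hp⟩]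
  · rw [pvIsPrimeA_composite num h2 hp]
    rcases hb : pvIsPrimeB num with _ | _
    · rfl
    · exact absurd ((pvIsPrimeB_iff num).mp hb).2 hp

theorem pvLoops_eq (fuel : Nat) : ∀ (needed : Int) (primes : List Int) (num : Int),
    2 ≤ num → pvALoop needed fuel primes num = pvBLoop needed fuel primes num := by
  induction fuel with
  | zero => intro needed primes num _; rfl
  | succ f ih =>
    intro needed primes num h2
    rw [pvALoop, pvBLoop]
    split
    · rw [pvTests_agree num h2]
      split
      · exact ih needed (primes ++ [num]) (num + 1) (by omega)
      · exact ih needed primes (num + 1) (by omega)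
    · rfl

theorem pvRows_eq (ps : List Int) (k : Nat) : ∀ (a : Int), 0 ≤ a →
    ∀ (acc : List (List Int)) (idx : Nat),
    ((PySem.List.pyRange a (a + (k : Int)) 1).foldl
      (fun (st : List (List Int) × Int) i =>
        (st.1 ++ [PySem.List.slice ps (some st.2) (some (st.2 + i))], st.2 + i))
      (acc, (idx : Int))).1
    = ((PySem.List.pyRange a (a + (k : Int)) 1).foldl
      (fun (st : List (List Int) × List Int) size =>
        (st.1 ++ [PySem.List.slice st.2 none (some size)], PySem.List.slice st.2 (some size) none))
      (acc, ps.drop idx)).1 := by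
  induction k with
  | zero =>
    intro a ha acc idx
    rw [PySem.List.pyRange_one_eq_nil (by omega)]
    rfl
  | succ k ih =>
    intro a ha acc idx
    obtain ⟨an, rfl⟩ : ∃ an : Nat, a = (an : Int) := ⟨a.toNat, (Int.toNat_of_nonneg ha).symm⟩
    rw [PySem.List.pyRange_one_cons (by omega : (an : Int) < (an : Int) + ((k + 1 : Nat) : Int))]
    simp only [List.foldl_cons]
    have hsliceA : PySem.List.slice ps (some (idx : Int)) (some ((idx : Int) + (an : Int)))
        = (ps.drop idx).take an := PySem.List.slice_natCast_add ps idx an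
    have hsliceB1 : PySem.List.slice (ps.drop idx) none (some (an : Int))
        = (ps.drop idx).take an := by
      rw [PySem.List.slice_to _ (by omega : (0:Int) ≤ (an : Int))]
      simp
    have hsliceB2 : PySem.List.slice (ps.drop idx) (some (an : Int)) none
        = ps.drop (idx + an) := by
      rw [PySem.List.slice_from _ (by omega : (0:Int) ≤ (an : Int))]
      simp [List.drop_drop]
    rw [hsliceA, hsliceB1, hsliceB2]
    have hidx : (idx : Int) + (an : Int) = ((idx + an : Nat) : Int) := by push_cast; ring
    have hrange : (an : Int) + ((k + 1 : Nat) : Int) = ((an : Int) + 1) + (k : Int) := by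
      push_cast; ring
    rw [hidx, hrange]
    have := ih ((an : Int) + 1) (by omega) (acc ++ [(ps.drop idx).take an]) (idx + an)
    simpa using this

theorem pvMain (height : Int) : draw_triangle_prime height = draw_triangle_prime_alt height := by
  unfold draw_triangle_prime draw_triangle_prime_alt
  dsimp only []
  rw [pvLoops_eq _ _ _ 2 (by norm_num)]
  set ps := pvBLoop (PySem.Int.floordiv (height * (height + 1)) 2)
    (2 ^ (PySem.Int.floordiv (height * (height + 1)) 2).toNat + 4) [] 2 with hps
  rcases (by omega : 0 ≤ height ∨ height < 0) with hpos | hneg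
  · have hb : height + 1 = (1 : Int) + (height.toNat : Int) := by omega
    rw [hb]
    have := pvRows_eq ps height.toNat 1 (by norm_num) [] 0
    simpa using this
  · rw [PySem.List.pyRange_one_eq_nil (by omega : height + 1 ≤ 1)]
    rfl

-- ===== VERDICT (by name: the statement is the Claim_ definition above) =====
theorem draw_triangle_prime_spec : Claim_equal_draw_triangle_prime := by
  intro height _
  exact pvMain height
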